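-- pv_equiv track=rewrite | github.com/BRodas/python_library | MyClippingParser.py | diccionario_libro
-- ===== SOURCE A (Python) =====
-- def diccionario_libro(documento,separador):
--
-- 	# Variables auxiliares
-- 	libro = []
--
-- 	# Diccionario libros
-- 	diccionario_libros = {}
-- 	trozo_documento = []
--
-- 	# Se leen linea por linea hasta que toca una con "=========="
-- 	for linea in documento:
-- 		# Si no hay un separador
-- 		if not linea == separador:
-- 			# Agrega la linea
-- 			trozo_documento.append(linea)
--
-- 		# Si HAY un separador
-- 		else:
-- 			# Agrega el conjunto de lineas a una parte del diccionario
-- 			diccionario_libros.setdefault(trozo_documento[0],[])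
-- 			diccionario_libros[trozo_documento[0]].extend(trozo_documento[1:])
-- 			diccionario_libros[trozo_documento[0]].append('######################################################################'+'\n'+'\n')
-- 			# Vacia el pedazo que se leyo
-- 			trozo_documento = []
--
-- 	return diccionario_libros
-- ===== SOURCE B (Python) =====
-- def diccionario_libro(documento, separador):
--     banner = '######################################################################' + '\n' + '\n'
--     diccionario_libros = {}
--     # Repeatedly split off the first separator-terminated block; trailing lines
--     # after the last separator are never flushed (same as A's behaviour).
--     while separador in documento:
--         i = documento.index(separador)
--         bloque, documento = documento[:i], documento[i + 1:]
--         diccionario_libros.setdefault(bloque[0], []).extend(bloque[1:])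
--         diccionario_libros[bloque[0]].append(banner)
--     return diccionario_libros
-- ===== Notes on version B (the rewrite author's own statement) =====
-- stated objective: alternative
-- what changed: Replaces A's single interleaved accumulate-and-flush fold (growing a chunk line by line and flushing it on each separator) by a split-then-build loop that repeatedly finds the first separator with membership test + index and slices off one whole block at a time.
import Mathlib
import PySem

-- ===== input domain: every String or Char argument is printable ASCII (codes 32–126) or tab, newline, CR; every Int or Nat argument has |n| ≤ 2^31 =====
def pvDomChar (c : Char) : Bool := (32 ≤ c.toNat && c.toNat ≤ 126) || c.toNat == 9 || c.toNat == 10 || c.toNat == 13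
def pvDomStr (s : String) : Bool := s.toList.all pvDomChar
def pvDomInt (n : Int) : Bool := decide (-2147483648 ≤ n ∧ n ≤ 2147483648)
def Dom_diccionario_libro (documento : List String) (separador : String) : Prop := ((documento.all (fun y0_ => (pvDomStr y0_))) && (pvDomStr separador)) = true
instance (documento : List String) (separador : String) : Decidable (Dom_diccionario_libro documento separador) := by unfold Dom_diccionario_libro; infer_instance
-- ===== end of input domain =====

-- B replaces A's interleaved accumulate-and-flush loop by repeatedly splitting off the
-- first separator-terminated block (membership test + index + slices); alternative
-- decomposition, same behaviour wherever A returns.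

-- The dict update done on flushing a block is textually identical in both Pythons
-- (setdefault / extend / append of the banner), so both ports share this helper.
def pvBanner : String := "######################################################################" ++ "\n" ++ "\n"

def pvAddBlock (d : PySem.Dict String (List String)) (k : String) (resto : List String) :
    PySem.Dict String (List String) :=
  let d1 := d.setdefault k []
  let d2 := d1.modify k [] (fun v => v ++ resto)
  d2.modify k [] (fun v => v ++ [pvBanner])

-- ===== PORT A =====
def pvStepA (separador : String) (st : PySem.Dict String (List String) × List String)
    (linea : String) : PySem.Dict String (List String) × List String :=
  if ¬ (linea == separador) then (st.1, st.2 ++ [linea])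
  else
    match st.2 with
    | [] => (st.1, [])  -- Python raises IndexError on trozo_documento[0]; excluded by Pre_
    | k :: resto => (pvAddBlock st.1 k resto, [])

def diccionario_libro (documento : List String) (separador : String) : List (String × List String) :=
  (documento.foldl (pvStepA separador) ((PySem.Dict.empty : PySem.Dict String (List String)), [])).1.items

-- ===== PORT B =====
-- `while separador in documento: i = documento.index(separador)` : the membership test
-- succeeds exactly when index? is some, so the two are ported as one match on index?.
def pvAltLoop (diccionario_libros : PySem.Dict String (List String)) (documento : List String)
    (separador : String) : PySem.Dict String (List String) :=
  match h : PySem.List.index? documento separador with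
  | none => diccionario_libros
  | some i =>
    let bloque := documento.take i
    let resto := documento.drop (i + 1)
    match bloque with
    | [] => diccionario_libros  -- Python raises IndexError on bloque[0]; excluded by Pre_
    | k :: restb => pvAltLoop (pvAddBlock diccionario_libros k restb) resto separador
termination_by documento.length
decreasing_by
  have hmem : separador ∈ documento := (PySem.List.index?_isSome_iff _ _).mp (by rw [h]; rfl)
  have : 0 < documento.length := List.length_pos_of_mem hmem
  simp only [List.length_drop]; omega

def diccionario_libro_alt (documento : List String) (separador : String) : List (String × List String) :=
  (pvAltLoop PySem.Dict.empty documento separador).items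

-- ===== PRECONDITION & SPEC =====
-- Pre_ excludes exactly the inputs where A raises IndexError: a separator line as the very
-- first line or immediately after another separator line (an empty block); B raises there too.
def Pre_diccionario_libro (documento : List String) (separador : String) : Prop :=
  documento.head? ≠ some separador ∧
  List.IsChain (fun a b => b = separador → a ≠ separador) documento
instance (documento : List String) (separador : String) : Decidable (Pre_diccionario_libro documento separador) := by unfold Pre_diccionario_libro; infer_instance

def pvWitness_diccionario_libro : List String × String :=
  (["Book A", "line 1", "==", "Book B", "=="], "==")

def Spec_diccionario_libro (documento : List String) (separador : String) (out : List (String × List String)) : Prop := out = diccionario_libro_alt documento separador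
instance (documento : List String) (separador : String) (out : List (String × List String)) : Decidable (Spec_diccionario_libro documento separador out) := by unfold Spec_diccionario_libro; infer_instance

-- ===== CLAIM (what is proved, stated in full; the proofs are below) =====
def Claim_equal_diccionario_libro : Prop := ∀ (documento : List String) (separador : String), Dom_diccionario_libro documento separador → Pre_diccionario_libro documento separador → Spec_diccionario_libro documento separador (diccionario_libro documento separador)

-- ===== LEMMAS AND PROOFS =====

-- A's fold over a separator-free prefix only appends the lines to trozo_documento.
lemma pvFoldA_sepfree (sep : String) (d : PySem.Dict String (List String))
    (t xs rest : List String) (h : ∀ l ∈ xs, l ≠ sep) :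
    (xs ++ rest).foldl (pvStepA sep) (d, t) = rest.foldl (pvStepA sep) (d, t ++ xs) := by
  induction xs generalizing t with
  | nil => simp
  | cons x xs ih =>
    have hx : x ≠ sep := h x (by simp)
    simp only [List.cons_append, List.foldl_cons]
    rw [show pvStepA sep (d, t) x = (d, t ++ [x]) by simp [pvStepA, hx]]
    rw [ih (t ++ [x]) (fun l hl => h l (by simp [hl]))]
    simp

-- Core equivalence: A's fold from an empty chunk equals B's split-off loop, on inputs
-- with no empty separator-terminated block.
lemma pvMainAux (sep : String) : ∀ (n : Nat) (doc : List String), doc.length ≤ n →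
    doc.head? ≠ some sep →
    List.IsChain (fun a b => b = sep → a ≠ sep) doc →
    ∀ d, (doc.foldl (pvStepA sep) (d, [])).1 = pvAltLoop d doc sep := by
  intro n
  induction n with
  | zero =>
    intro doc hlen _ _ d
    have : doc = [] := List.eq_nil_of_length_eq_zero (Nat.le_zero.mp hlen)
    subst this
    rw [pvAltLoop]
    simp [PySem.List.index?_eq_idxOf?]
  | succ n ih =>
    intro doc hlen hhead hchain d
    match hidx : PySem.List.index? doc sep with
    | none =>
      have hnot : sep ∉ doc := (PySem.List.index?_eq_none_iff _ _).mp hidx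
      rw [pvAltLoop, hidx]
      have := pvFoldA_sepfree sep d [] doc [] (fun l hl => by rintro rfl; exact hnot hl)
      simpa using congrArg Prod.fst this
    | some i =>
      obtain ⟨pre, suf, hdoc, hpre_len, hpre_not⟩ :=
        (PySem.List.index?_eq_some_iff _ _ _).mp hidx
      -- pre is nonempty: otherwise doc starts with sep
      match pre, hpre_len with
      | [], _ =>
        exfalso; apply hhead; rw [hdoc]; rfl
      | k :: restb, hpre_len =>
        subst hdoc
        -- unfold one round of pvAltLoop
        rw [pvAltLoop, hidx]
        have htake : ((k :: restb) ++ sep :: suf).take i = k :: restb := by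
          rw [← hpre_len]; exact List.take_left
        have hdrop : ((k :: restb) ++ sep :: suf).drop (i + 1) = suf := by
          rw [← hpre_len]
          rw [show (k :: restb).length + 1 = ((k :: restb) ++ [sep]).length by simp]
          rw [show (k :: restb) ++ sep :: suf = ((k :: restb) ++ [sep]) ++ suf by simp]
          exact List.drop_left
        simp only [htake, hdrop]
        -- A's side: run the separator-free prefix, then the flush step
        have hfree : ∀ l ∈ (k :: restb), l ≠ sep := fun l hl => by
          rintro rfl; exact hpre_not hl
        rw [pvFoldA_sepfree sep d [] (k :: restb) (sep :: suf) hfree]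
        simp only [List.nil_append, List.foldl_cons]
        rw [show pvStepA sep (d, k :: restb) sep = (pvAddBlock d k restb, []) by
          simp [pvStepA]]
        -- chain facts for suf
        have hchain' : List.IsChain (fun a b => b = sep → a ≠ sep) (sep :: suf) :=
          hchain.right_of_append
        have hhead' : suf.head? ≠ some sep := by
          intro hs
          rcases List.isChain_cons.mp hchain' with ⟨hrel, _⟩
          exact hrel sep hs rfl rfl
        have hchain_suf : List.IsChain (fun a b => b = sep → a ≠ sep) suf :=
          (List.isChain_cons.mp hchain').2
        have hlen' : suf.length ≤ n := by
          have := congrArg List.length (rfl : (k :: restb) ++ sep :: suf = (k :: restb) ++ sep :: suf)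
          simp only [List.length_append, List.length_cons] at hlen ⊢
          omega
        exact ih suf hlen' hhead' hchain_suf (pvAddBlock d k restb)

-- ===== VERDICT (by name: the statement is the Claim_ definition above) =====
theorem diccionario_libro_spec : Claim_equal_diccionario_libro := by
  intro documento separador _ hpre
  unfold Spec_diccionario_libro diccionario_libro diccionario_libro_alt
  exact congrArg PySem.Dict.items
    (pvMainAux separador documento.length documento le_rfl hpre.1 hpre.2 PySem.Dict.empty)
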